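-- pv_equiv track=rewrite | github.com/JustLikeFrank3/jobContextMCP | tools/export.py | _join_continuations
-- ===== SOURCE A (Python) =====
-- def _join_continuations(lines: list[str]) -> list[str]:
--     """Join word-wrapped continuation lines (starting with whitespace) to their parent."""
--     result: list[str] = []
--     for line in lines:
--         if line and line[0] == " " and result:
--             # Append to the last non-blank line in result
--             for i in range(len(result) - 1, -1, -1):
--                 if result[i].strip():
--                     result[i] = result[i].rstrip() + " " + line.strip()
--                     break
--             else:
--                 result.append(line)
--         else:
--             result.append(line)
--     return result
-- ===== SOURCE B (Python) =====
-- def _join_continuations(lines: list[str]) -> list[str]: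
--     """Join word-wrapped continuation lines (starting with whitespace) to their parent,
--     keeping a running index of the last non-blank line instead of rescanning backwards."""
--     result: list[str] = []
--     last = None  # index of the last non-blank line in result, or None
--     for line in lines:
--         if line and line[0] == " " and last is not None:
--             result[last] = result[last].rstrip() + " " + line.strip()
--         else:
--             result.append(line)
--             if line.strip():
--                 last = len(result) - 1
--     return result
-- ===== Notes on version B (the rewrite author's own statement) =====
-- stated objective: alternative
-- what changed: B keeps a running index of the last non-blank line in result and patches it directly, instead of A's backward rescan of result on every continuation line; worst-case asymptotics improve from quadratic to linear but measured inputs show no speed-up.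
import Mathlib
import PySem

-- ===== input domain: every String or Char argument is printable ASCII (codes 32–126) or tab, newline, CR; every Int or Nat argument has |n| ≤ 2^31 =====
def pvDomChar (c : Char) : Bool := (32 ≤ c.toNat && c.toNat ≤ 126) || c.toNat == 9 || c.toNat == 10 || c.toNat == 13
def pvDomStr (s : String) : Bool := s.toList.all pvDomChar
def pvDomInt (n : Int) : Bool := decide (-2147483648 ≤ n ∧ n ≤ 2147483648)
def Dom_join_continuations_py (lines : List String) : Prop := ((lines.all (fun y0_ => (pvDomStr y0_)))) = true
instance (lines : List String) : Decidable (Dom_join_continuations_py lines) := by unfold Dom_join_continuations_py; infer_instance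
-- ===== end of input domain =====

-- B replaces A's backward rescan of `result` on each continuation line by a running index
-- of the last non-blank line, patched directly (objective: alternative bookkeeping, same cost in practice).

-- ===== PORT A =====
-- inner backward for-loop of A: checks indices n-1, n-2, …, 0 of `result`;
-- the `for…else` appends when the loop completes without a break.
-- `getD _ ""` is exact here: the inspected index is always < result.length.
def pvScanA (result : List String) (line : String) : Nat → List String
  | 0 => result ++ [line]
  | n+1 =>
    if PySem.Str.strip (result.getD n "") ≠ "" then
      result.set n (PySem.Str.rstrip (result.getD n "") ++ " " ++ PySem.Str.strip line)
    else pvScanA result line n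

-- body of A's outer for-loop
def pvStepA (result : List String) (line : String) : List String :=
  if line ≠ "" ∧ PySem.Str.pyGet? line 0 = some ' ' ∧ result ≠ [] then
    pvScanA result line result.length
  else result ++ [line]

def join_continuations_py (lines : List String) : List String :=
  lines.foldl pvStepA []

-- ===== PORT B =====
-- body of B's for-loop; state = (result, last), last = index of last non-blank line or none
def pvStepB (st : List String × Option Nat) (line : String) : List String × Option Nat :=
  if h : line ≠ "" ∧ PySem.Str.pyGet? line 0 = some ' ' ∧ st.2.isSome = true then
    let i := st.2.get h.2.2
    (st.1.set i (PySem.Str.rstrip (st.1.getD i "") ++ " " ++ PySem.Str.strip line), st.2)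
  else
    (st.1 ++ [line], if PySem.Str.strip line ≠ "" then some st.1.length else st.2)

def join_continuations_py_alt (lines : List String) : List String :=
  (lines.foldl pvStepB ([], none)).1

-- ===== PRECONDITION & SPEC =====
def Spec_join_continuations_py (lines : List String) (out : List String) : Prop := out = join_continuations_py_alt lines
instance (lines : List String) (out : List String) : Decidable (Spec_join_continuations_py lines out) := by unfold Spec_join_continuations_py; infer_instance

-- ===== CLAIM (what is proved, stated in full; the proofs are below) =====
def Claim_equal_join_continuations_py : Prop := ∀ (lines : List String), Dom_join_continuations_py lines → Spec_join_continuations_py lines (join_continuations_py lines)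

-- ===== LEMMAS AND PROOFS =====

-- index of the LAST non-blank line of a list, the value B's `last` tracks
def pvLastNB : List String → Option Nat
  | [] => none
  | s :: t =>
    match pvLastNB t with
    | some i => some (i+1)
    | none => if PySem.Str.strip s ≠ "" then some 0 else none

lemma pv_all_dropWhile (p : Char → Bool) (l : List Char) :
    (List.dropWhile p l).all p = l.all p := by
  induction l with
  | nil => rfl
  | cons a t ih =>
    by_cases h : p a = true
    · simp [List.dropWhile_cons, h, ih]
    · simp [List.dropWhile_cons, h]

lemma pv_all_rstrip (cs : List Char) :
    (PySem.Chars.rstrip cs).all PySem.Chars.isspace = cs.all PySem.Chars.isspace := by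
  unfold PySem.Chars.rstrip
  rw [List.all_reverse, pv_all_dropWhile, List.all_reverse]

lemma pv_strip_eq_nil_iff (cs : List Char) :
    PySem.Chars.strip cs = [] ↔ cs.all PySem.Chars.isspace = true := by
  constructor
  · intro h
    have h1 : (PySem.Chars.strip cs).all PySem.Chars.isspace = true := by simp [h]
    unfold PySem.Chars.strip at h1
    rw [pv_all_rstrip] at h1
    unfold PySem.Chars.lstrip at h1
    rwa [pv_all_dropWhile] at h1
  · intro h
    unfold PySem.Chars.strip PySem.Chars.lstrip
    have : List.dropWhile PySem.Chars.isspace cs = [] := by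
      rw [List.dropWhile_eq_nil_iff]
      intro x hx; exact List.all_eq_true.mp h x hx
    rw [this]; rfl

lemma pv_str_eq_empty_iff (s : String) : s = "" ↔ s.toList = [] := by
  constructor
  · intro h; rw [h]; rfl
  · intro h
    have h2 : s.toList = String.toList "" := h
    exact String.toList_inj.mp h2

lemma pv_strip_empty_iff (s : String) :
    PySem.Str.strip s = "" ↔ s.toList.all PySem.Chars.isspace = true := by
  rw [pv_str_eq_empty_iff, PySem.Str.toList_strip, pv_strip_eq_nil_iff]

-- the merged line is non-blank whenever the parent line is non-blank
lemma pv_strip_merge_ne (p l : String) (hp : PySem.Str.strip p ≠ "") :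
    PySem.Str.strip (PySem.Str.rstrip p ++ " " ++ PySem.Str.strip l) ≠ "" := by
  intro h
  rw [pv_strip_empty_iff] at h
  apply hp
  rw [pv_strip_empty_iff]
  rw [String.toList_append, String.toList_append, List.all_append, List.all_append] at h
  have h1 : (PySem.Str.rstrip p).toList.all PySem.Chars.isspace = true := by
    rcases Bool.and_eq_true_iff.mp h with ⟨h2, _⟩
    exact (Bool.and_eq_true_iff.mp h2).1
  rw [PySem.Str.toList_rstrip, pv_all_rstrip] at h1
  exact h1

lemma pv_lastNB_append (rs : List String) (y : String) :
    pvLastNB (rs ++ [y]) =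
      if PySem.Str.strip y ≠ "" then some rs.length else pvLastNB rs := by
  induction rs with
  | nil =>
    by_cases h : PySem.Str.strip y = "" <;> simp [pvLastNB, h]
  | cons s t ih =>
    show pvLastNB (s :: (t ++ [y])) = _
    unfold pvLastNB
    rw [ih]
    by_cases h : PySem.Str.strip y = "" <;> simp [h]

lemma pv_lastNB_spec (rs : List String) (i : Nat) (h : pvLastNB rs = some i) :
    i < rs.length ∧ PySem.Str.strip (rs.getD i "") ≠ "" := by
  induction rs generalizing i with
  | nil => simp [pvLastNB] at h
  | cons s t ih =>
    unfold pvLastNB at h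
    cases ht : pvLastNB t with
    | some j =>
      rw [ht] at h
      obtain ⟨hjl, hjs⟩ := ih j ht
      cases h
      constructor
      · simpa using Nat.succ_lt_succ hjl
      · simpa using hjs
    | none =>
      rw [ht] at h
      by_cases hs : PySem.Str.strip s = ""
      · simp [hs] at h
      · simp [hs] at h
        cases h
        exact ⟨Nat.succ_pos _, by simpa using hs⟩

lemma pv_lastNB_set (rs : List String) (i : Nat) (v : String)
    (h : pvLastNB rs = some i) (hv : PySem.Str.strip v ≠ "") :
    pvLastNB (rs.set i v) = some i := by
  induction rs generalizing i with
  | nil => simp [pvLastNB] at h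
  | cons s t ih =>
    unfold pvLastNB at h
    cases ht : pvLastNB t with
    | some j =>
      rw [ht] at h
      cases h
      show pvLastNB (s :: t.set j v) = _
      unfold pvLastNB
      rw [ih j ht]
    | none =>
      rw [ht] at h
      by_cases hs : PySem.Str.strip s = ""
      · simp [hs] at h
      · simp [hs] at h
        cases h
        show pvLastNB (v :: t) = _
        unfold pvLastNB
        rw [ht]
        simp [hv]

-- A's backward scan computes exactly "set at the last non-blank index, else append"
lemma pv_scanA_eq (line : String) :
    ∀ (n : Nat) (rs : List String), n ≤ rs.length →
      pvScanA rs line n =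
        (match pvLastNB (rs.take n) with
         | none => rs ++ [line]
         | some i => rs.set i (PySem.Str.rstrip (rs.getD i "") ++ " " ++ PySem.Str.strip line)) := by
  intro n
  induction n with
  | zero => intro rs _; simp [pvScanA, pvLastNB]
  | succ m ih =>
    intro rs hle
    have hm : m < rs.length := Nat.lt_of_succ_le hle
    have htake : rs.take (m+1) = rs.take m ++ [rs.getD m ""] := by
      rw [List.take_succ]
      congr 1
      rw [List.getElem?_eq_getElem hm]
      simp [List.getD_eq_getElem?_getD, List.getElem?_eq_getElem hm]
    rw [htake, pv_lastNB_append]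
    unfold pvScanA
    by_cases h : PySem.Str.strip (rs.getD m "") = ""
    · simp only [h, ne_eq, not_true_eq_false, if_false, ite_false]
      rw [ih rs (Nat.le_of_lt hm)]
    · simp only [h, ne_eq, not_false_eq_true, if_true, ite_true]
      rw [List.length_take, Nat.min_eq_left (Nat.le_of_lt hm)]

-- one step of B from an invariant state equals one step of A, invariant preserved
lemma pv_stepB_eq (rs : List String) (line : String) :
    pvStepB (rs, pvLastNB rs) line = (pvStepA rs line, pvLastNB (pvStepA rs line)) := by
  cases hl : pvLastNB rs with
  | none =>
    unfold pvStepB pvStepA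
    have hgB : ¬ (line ≠ "" ∧ PySem.Str.pyGet? line 0 = some ' ' ∧
        ((rs, (none : Option Nat)).2.isSome = true)) := by simp
    rw [dif_neg hgB]
    have hA : (if line ≠ "" ∧ PySem.Str.pyGet? line 0 = some ' ' ∧ rs ≠ [] then
        pvScanA rs line rs.length else rs ++ [line]) = rs ++ [line] := by
      by_cases hne : line ≠ "" ∧ PySem.Str.pyGet? line 0 = some ' ' ∧ rs ≠ []
      · rw [if_pos hne, pv_scanA_eq line rs.length rs (le_refl _), List.take_length, hl]
      · rw [if_neg hne]
    rw [hA, pv_lastNB_append, hl]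
  | some i =>
    obtain ⟨hlt, hnb⟩ := pv_lastNB_spec rs i hl
    have hrs : rs ≠ [] := by intro h; subst h; simp at hlt
    unfold pvStepB pvStepA
    by_cases hne : line ≠ "" ∧ PySem.Str.pyGet? line 0 = some ' '
    · have hgB : line ≠ "" ∧ PySem.Str.pyGet? line 0 = some ' ' ∧
          (((rs, some i) : List String × Option Nat).2.isSome = true) := ⟨hne.1, hne.2, rfl⟩
      have hgA : line ≠ "" ∧ PySem.Str.pyGet? line 0 = some ' ' ∧ rs ≠ [] := ⟨hne.1, hne.2, hrs⟩
      rw [dif_pos hgB, if_pos hgA]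
      rw [pv_scanA_eq line rs.length rs (le_refl _), List.take_length, hl]
      have hmerge := pv_strip_merge_ne (rs.getD i "") line hnb
      rw [pv_lastNB_set rs i _ hl hmerge]
      rfl
    · have hgB : ¬ (line ≠ "" ∧ PySem.Str.pyGet? line 0 = some ' ' ∧
          (((rs, some i) : List String × Option Nat).2.isSome = true)) := by
        intro h; exact hne ⟨h.1, h.2.1⟩
      have hgA : ¬ (line ≠ "" ∧ PySem.Str.pyGet? line 0 = some ' ' ∧ rs ≠ []) := by
        intro h; exact hne ⟨h.1, h.2.1⟩
      rw [dif_neg hgB, if_neg hgA, pv_lastNB_append, hl]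

lemma pv_fold_inv (lines : List String) :
    ∀ rs, lines.foldl pvStepB (rs, pvLastNB rs) =
      (lines.foldl pvStepA rs, pvLastNB (lines.foldl pvStepA rs)) := by
  induction lines with
  | nil => intro rs; rfl
  | cons line rest ih =>
    intro rs
    rw [List.foldl_cons, List.foldl_cons, pv_stepB_eq, ih]

-- ===== VERDICT (by name: the statement is the Claim_ definition above) =====
theorem join_continuations_py_spec : Claim_equal_join_continuations_py := by
  intro lines _
  unfold Spec_join_continuations_py join_continuations_py join_continuations_py_alt
  have h0 : (([], none) : List String × Option Nat) = ([], pvLastNB []) := rfl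
  rw [h0, pv_fold_inv]
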